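-- pv_equiv track=rewrite | github.com/edwardl903/chesslyzer | src/stats/analysis.py | get_first_defense_and_non_defense
-- ===== SOURCE A (Python) =====
-- def get_first_defense_and_non_defense(my_openings):
--     first_defense = None
--     first_non_defense = None
--
--     for opening, count in my_openings.items():
--         # Skip the string "N/A"
--         if opening == "N/A":
--             continue
--
--         if 'Defense' in opening and first_defense is None:
--             first_defense = opening
--         elif 'Defense' not in opening and first_non_defense is None:
--             first_non_defense = opening
--
--         # Break early once we find both
--         if first_defense and first_non_defense:
--             break
--
--     return first_defense, first_non_defense
-- ===== SOURCE B (Python) =====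
-- def get_first_defense_and_non_defense(my_openings):
--     first_defense = next(
--         (o for o in my_openings if o != "N/A" and 'Defense' in o), None)
--     first_non_defense = next(
--         (o for o in my_openings if o != "N/A" and 'Defense' not in o), None)
--     return first_defense, first_non_defense
-- ===== Notes on version B (the rewrite author's own statement) =====
-- stated objective: idiomatic
-- what changed: A's single interleaved loop with mutable state and an early break is replaced by two independent next()-over-generator scans, one per return value.
import Mathlib
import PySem

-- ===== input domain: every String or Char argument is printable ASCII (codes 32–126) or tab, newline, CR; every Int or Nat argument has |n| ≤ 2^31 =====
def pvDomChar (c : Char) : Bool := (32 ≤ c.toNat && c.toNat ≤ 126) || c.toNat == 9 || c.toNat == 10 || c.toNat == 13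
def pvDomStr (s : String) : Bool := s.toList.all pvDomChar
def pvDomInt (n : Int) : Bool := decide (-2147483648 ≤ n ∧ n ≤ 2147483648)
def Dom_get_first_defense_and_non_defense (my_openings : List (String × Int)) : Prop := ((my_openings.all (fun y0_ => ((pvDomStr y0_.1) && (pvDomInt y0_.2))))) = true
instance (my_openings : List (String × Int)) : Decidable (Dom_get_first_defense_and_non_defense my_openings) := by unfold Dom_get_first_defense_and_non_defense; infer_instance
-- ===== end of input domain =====

-- B replaces A's single interleaved loop (mutable state + early break) by two
-- independent first-match scans, one per return value (idiomatic; same cost).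

-- ===== PORT A =====
-- truthiness of an Optional[str]: None and "" are falsy (used only in A's break test)
def pyTruthyOptStr (o : Option String) : Bool :=
  match o with
  | none => false
  | some s => !(s == "")

-- the loop of A: state (first_defense, first_non_defense), early break once both truthy
def goA : List (String × Int) → Option String → Option String → Option String × Option String
  | [], fd, fnd => (fd, fnd)
  | (opening, _) :: rest, fd, fnd =>
    if opening == "N/A" then goA rest fd fnd
    else
      let fd' := if PySem.Str.isIn "Defense" opening && fd.isNone then some opening else fd
      let fnd' := if !(PySem.Str.isIn "Defense" opening && fd.isNone)
                     && !(PySem.Str.isIn "Defense" opening) && fnd.isNone then some opening else fnd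
      if pyTruthyOptStr fd' && pyTruthyOptStr fnd' then (fd', fnd')
      else goA rest fd' fnd'

def get_first_defense_and_non_defense (my_openings : List (String × Int)) : Option String × Option String :=
  goA my_openings none none

-- ===== PORT B =====
def get_first_defense_and_non_defense_alt (my_openings : List (String × Int)) : Option String × Option String :=
  ((my_openings.find? (fun p => !(p.1 == "N/A") && PySem.Str.isIn "Defense" p.1)).map (·.1),
   (my_openings.find? (fun p => !(p.1 == "N/A") && !(PySem.Str.isIn "Defense" p.1))).map (·.1))

-- ===== PRECONDITION & SPEC =====
def Spec_get_first_defense_and_non_defense (my_openings : List (String × Int)) (out : Option String × Option String) : Prop := out = get_first_defense_and_non_defense_alt my_openings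
instance (my_openings : List (String × Int)) (out : Option String × Option String) : Decidable (Spec_get_first_defense_and_non_defense my_openings out) := by unfold Spec_get_first_defense_and_non_defense; infer_instance

-- ===== CLAIM (what is proved, stated in full; the proofs are below) =====
def Claim_equal_get_first_defense_and_non_defense : Prop := ∀ (my_openings : List (String × Int)), Dom_get_first_defense_and_non_defense my_openings → Spec_get_first_defense_and_non_defense my_openings (get_first_defense_and_non_defense my_openings)

-- ===== LEMMAS AND PROOFS =====

-- a truthy Optional[str] is some nonempty string, so Option.or keeps it
theorem or_of_truthy (x y : Option String) (h : pyTruthyOptStr x = true) : x.or y = x := by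
  cases x <;> simp_all [pyTruthyOptStr]

-- Invariant of A's loop: each state field is filled, first writer wins, with the first
-- key matching its predicate; the early break only fires when both fields are some,
-- and then Option.or discards the rest of the scan anyway.
theorem goA_eq (l : List (String × Int)) (fd fnd : Option String) :
    goA l fd fnd =
      (fd.or ((l.find? (fun p => !(p.1 == "N/A") && PySem.Str.isIn "Defense" p.1)).map (·.1)),
       fnd.or ((l.find? (fun p => !(p.1 == "N/A") && !(PySem.Str.isIn "Defense" p.1))).map (·.1))) := by
  induction l generalizing fd fnd with
  | nil => simp [goA]
  | cons hd tl ih =>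
    obtain ⟨o, c⟩ := hd
    by_cases hna : o = "N/A"
    · simp [goA, hna, List.find?, ih]
    · have hna' : (o == "N/A") = false := by simp [hna]
      cases hdef : PySem.Str.isIn "Defense" o with
      | true =>
        have hdef' : PySem.Chars.isIn ['D','e','f','e','n','s','e'] o.toList = true := by
          simpa using hdef
        cases fd with
        | none =>
          simp [goA, List.find?, hna', hdef']
          split
          · next h => rw [or_of_truthy _ _ h.2]
          · simp [ih]
        | some a =>
          simp [goA, List.find?, hna', hdef']
          split
          · next h => rw [or_of_truthy _ _ h.2]
          · simp [ih]
      | false =>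
        have hdef' : PySem.Chars.isIn ['D','e','f','e','n','s','e'] o.toList = false := by
          simpa using hdef
        cases fnd with
        | none =>
          simp [goA, List.find?, hna', hdef']
          split
          · next h => rw [or_of_truthy _ _ h.1]
          · simp [ih]
        | some b =>
          simp [goA, List.find?, hna', hdef']
          split
          · next h => rw [or_of_truthy _ _ h.1]
          · simp [ih]

-- ===== VERDICT (by name: the statement is the Claim_ definition above) =====
theorem get_first_defense_and_non_defense_spec : Claim_equal_get_first_defense_and_non_defense := by
  intro l _
  unfold Spec_get_first_defense_and_non_defense get_first_defense_and_non_defense get_first_defense_and_non_defense_alt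
  simp [goA_eq]
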